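-- pv_equiv track=rewrite | github.com/hetica/bentools | modules/overlap_dekupl_stringtie/overlap_dekupl_stringtie.py | getChromList
-- ===== SOURCE A (Python) =====
-- def getChromList(chr_list):
--     digit = []
--     alpha = []
--     for i, v in enumerate(chr_list):
--         if v.isdigit():
--             digit.append(v)
--         else:
--             alpha.append(v)
--     digit.sort(key=int)
--     alpha.sort(key=str)
--     return digit + alpha
-- ===== SOURCE B (Python) =====
-- def getChromList(chr_list):
--     return sorted(chr_list, key=lambda v: (0, int(v), "") if v.isdigit() else (1, 0, v))
-- ===== Notes on version B (the rewrite author's own statement) =====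
-- stated objective: simpler
-- what changed: Replaced the explicit index/partition loop plus two separate sorts and a concatenation with a single stable sorted() call whose composite group-tagged key (0,int(v),"") / (1,0,v) orders numeric labels first by value, then alpha labels by string.
import Mathlib
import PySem

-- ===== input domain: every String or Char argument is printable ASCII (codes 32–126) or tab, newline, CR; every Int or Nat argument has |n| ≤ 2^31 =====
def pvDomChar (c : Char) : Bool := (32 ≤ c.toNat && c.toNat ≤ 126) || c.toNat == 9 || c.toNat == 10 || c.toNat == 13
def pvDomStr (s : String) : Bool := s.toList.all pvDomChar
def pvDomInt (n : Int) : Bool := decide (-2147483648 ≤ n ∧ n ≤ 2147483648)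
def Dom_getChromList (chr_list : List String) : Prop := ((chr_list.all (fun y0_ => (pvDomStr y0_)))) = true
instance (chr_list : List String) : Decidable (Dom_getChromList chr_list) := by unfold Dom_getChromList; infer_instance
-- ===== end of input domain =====

-- B replaces A's partition loop plus two separate sorts and a concatenation by ONE stable sort
-- with a composite group-tagged key (simpler: one pass, no partition, no concatenation).

-- ===== PORT A =====
-- key=int on the digit bucket: every element there is all-digits, so int(v) = (ofStr? v).getD 0 exactly
def getChromList (chr_list : List String) : List String :=
  let st := (PySem.List.enumerate chr_list 0).foldl
    (fun (acc : List String × List String) iv =>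
      if PySem.Str.strIsdigit iv.2 then (acc.1 ++ [iv.2], acc.2) else (acc.1, acc.2 ++ [iv.2]))
    ([], [])
  let digit := PySem.List.sorted st.1 (fun v => (PySem.Int.ofStr? v).getD 0)
  let alpha := PySem.List.sorted st.2 (fun v => v)
  digit ++ alpha

-- ===== PORT B =====
-- Source B's composite tuple key (0, int(v), "") / (1, 0, v), compared lexicographically as Python
-- compares tuples (the components written out explicitly, as PYSEM.md prescribes for tuple keys)
def pyKeyLt (a b : String) : Bool :=
  if PySem.Str.strIsdigit a then
    if PySem.Str.strIsdigit b then
      decide ((PySem.Int.ofStr? a).getD 0 < (PySem.Int.ofStr? b).getD 0)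
    else true
  else
    if PySem.Str.strIsdigit b then false
    else decide (a < b)

-- sorted(chr_list, key=…) as its stable-insertion fold (PySem.List.sorted_eq_foldl_insertBy)
def getChromList_alt (chr_list : List String) : List String :=
  chr_list.foldl (fun acc x => PySem.List.insertBy pyKeyLt x acc) []

-- ===== PRECONDITION & SPEC =====
def Spec_getChromList (chr_list : List String) (out : List String) : Prop := out = getChromList_alt chr_list
instance (chr_list : List String) (out : List String) : Decidable (Spec_getChromList chr_list out) := by unfold Spec_getChromList; infer_instance

-- ===== CLAIM (what is proved, stated in full; the proofs are below) =====
def Claim_equal_getChromList : Prop := ∀ (chr_list : List String), Dom_getChromList chr_list → Spec_getChromList chr_list (getChromList chr_list)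

-- ===== LEMMAS AND PROOFS =====

theorem insertBy_congr {α : Type} (f g : α → α → Bool) (x : α) (ys : List α)
    (h : ∀ y ∈ ys, f x y = g x y) :
    PySem.List.insertBy f x ys = PySem.List.insertBy g x ys := by
  induction ys with
  | nil => rfl
  | cons y ys ih =>
    simp only [PySem.List.insertBy]
    rw [h y (List.mem_cons_self)]
    split
    · rfl
    · rw [ih (fun z hz => h z (List.mem_cons_of_mem _ hz))]

theorem foldl_insertBy_congr {α : Type} (f g : α → α → Bool) (S : List α)
    (hc : ∀ a ∈ S, ∀ b ∈ S, f a b = g a b) :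
    ∀ (xs acc : List α), xs ⊆ S → acc ⊆ S →
      xs.foldl (fun acc x => PySem.List.insertBy f x acc) acc
        = xs.foldl (fun acc x => PySem.List.insertBy g x acc) acc := by
  intro xs
  induction xs with
  | nil => intro acc _ _; rfl
  | cons x xs ih =>
    intro acc hxs hacc
    have hxS : x ∈ S := hxs List.mem_cons_self
    have hxs' : xs ⊆ S := fun a ha => hxs (List.mem_cons_of_mem _ ha)
    simp only [List.foldl_cons]
    rw [insertBy_congr f g x acc (fun y hy => hc x hxS y (hacc hy))]
    exact ih _ hxs' (fun a ha => by
      rcases (PySem.List.mem_insertBy _ _ _ _).1 ha with h | h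
      · exact h ▸ hxS
      · exact hacc h)

theorem insertBy_append_all_true {α : Type} (f : α → α → Bool) (x : α) (ys zs : List α)
    (h : ∀ z ∈ zs, f x z = true) :
    PySem.List.insertBy f x (ys ++ zs) = PySem.List.insertBy f x ys ++ zs := by
  induction ys with
  | nil =>
    cases zs with
    | nil => rfl
    | cons z zs =>
      simp only [List.nil_append, PySem.List.insertBy, h z List.mem_cons_self, if_true,
        List.singleton_append]
  | cons y ys ih =>
    simp only [List.cons_append, PySem.List.insertBy]
    split <;> simp [ih]

theorem insertBy_append_all_false {α : Type} (f : α → α → Bool) (x : α) (ys zs : List α)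
    (h : ∀ y ∈ ys, f x y = false) :
    PySem.List.insertBy f x (ys ++ zs) = ys ++ PySem.List.insertBy f x zs := by
  induction ys with
  | nil => rfl
  | cons y ys ih =>
    simp only [List.cons_append, PySem.List.insertBy, h y List.mem_cons_self]
    simp [ih (fun z hz => h z (List.mem_cons_of_mem _ hz))]

theorem foldl_insertBy_partition {α : Type} (p : α → Bool) (f : α → α → Bool)
    (hK : ∀ a b, p a = true → p b = false → f a b = true ∧ f b a = false) :
    ∀ (xs A0 A1 : List α), (∀ a ∈ A0, p a = true) → (∀ a ∈ A1, p a = false) →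
      xs.foldl (fun acc x => PySem.List.insertBy f x acc) (A0 ++ A1)
        = (xs.filter p).foldl (fun acc x => PySem.List.insertBy f x acc) A0
          ++ (xs.filter (fun a => !p a)).foldl (fun acc x => PySem.List.insertBy f x acc) A1 := by
  intro xs
  induction xs with
  | nil => intro A0 A1 _ _; rfl
  | cons x xs ih =>
    intro A0 A1 h0 h1
    simp only [List.foldl_cons, List.filter_cons]
    by_cases hp : p x = true
    · rw [insertBy_append_all_true f x A0 A1 (fun z hz => (hK x z hp (h1 z hz)).1)]
      simp only [hp, if_true, Bool.not_true, List.foldl_cons]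
      exact ih _ A1 (fun a ha => by
        rcases (PySem.List.mem_insertBy _ _ _ _).1 ha with h | h
        · exact h ▸ hp
        · exact h0 a h) h1
    · have hp' : p x = false := by revert hp; cases p x <;> simp
      rw [insertBy_append_all_false f x A0 A1 (fun y hy => (hK y x (h0 y hy) hp').2)]
      simp only [hp', Bool.not_false, if_true, List.foldl_cons]
      exact ih A0 _ h0 (fun a ha => by
        rcases (PySem.List.mem_insertBy _ _ _ _).1 ha with h | h
        · exact h ▸ hp'
        · exact h1 a h)

-- A's enumerate-loop is the (filter p, filter !p) partition
theorem enum_partition (p : String → Bool) :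
    ∀ (xs : List String) (s : Int) (acc : List String × List String),
      (PySem.List.enumerate xs s).foldl
        (fun (acc : List String × List String) iv =>
          if p iv.2 then (acc.1 ++ [iv.2], acc.2) else (acc.1, acc.2 ++ [iv.2])) acc
      = (acc.1 ++ xs.filter p, acc.2 ++ xs.filter (fun v => !p v)) := by
  intro xs
  induction xs with
  | nil => intro s acc; simp [PySem.List.enumerate_nil]
  | cons x xs ih =>
    intro s acc
    rw [PySem.List.enumerate_cons]
    simp only [List.foldl_cons, List.filter_cons]
    by_cases hp : p x = true
    · simp [hp, ih (s+1)]
    · have hp' : p x = false := by revert hp; cases p x <;> simp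
      simp [hp', ih (s+1)]

-- the composite comparator, per group
theorem pyKeyLt_digit (a b : String)
    (ha : PySem.Str.strIsdigit a = true) (hb : PySem.Str.strIsdigit b = true) :
    pyKeyLt a b = decide ((PySem.Int.ofStr? a).getD 0 < (PySem.Int.ofStr? b).getD 0) := by
  simp only [PySem.Str.strIsdigit] at ha hb
  simp [pyKeyLt, ha, hb]

theorem pyKeyLt_alpha (a b : String)
    (ha : PySem.Str.strIsdigit a = false) (hb : PySem.Str.strIsdigit b = false) :
    pyKeyLt a b = decide (a < b) := by
  simp only [PySem.Str.strIsdigit] at ha hb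
  simp [pyKeyLt, ha, hb, String.lt_iff_toList_lt]

theorem pyKeyLt_group (a b : String)
    (ha : PySem.Str.strIsdigit a = true) (hb : PySem.Str.strIsdigit b = false) :
    pyKeyLt a b = true ∧ pyKeyLt b a = false := by
  simp only [PySem.Str.strIsdigit] at ha hb
  constructor <;> simp [pyKeyLt, ha, hb]

-- ===== VERDICT (by name: the statement is the Claim_ definition above) =====
theorem getChromList_spec : Claim_equal_getChromList := by
  intro chr_list _
  unfold Spec_getChromList getChromList getChromList_alt
  rw [enum_partition PySem.Str.strIsdigit chr_list 0 ([], [])]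
  simp only [List.nil_append]
  have hsplit := foldl_insertBy_partition PySem.Str.strIsdigit pyKeyLt
    (fun a b ha hb => pyKeyLt_group a b ha hb) chr_list [] []
    (by simp) (by simp)
  simp only [List.nil_append] at hsplit
  rw [hsplit]
  congr 1
  · rw [PySem.List.sorted_eq_foldl_insertBy]
    exact (foldl_insertBy_congr pyKeyLt
      (fun a b => decide ((PySem.Int.ofStr? a).getD 0 < (PySem.Int.ofStr? b).getD 0))
      (chr_list.filter PySem.Str.strIsdigit)
      (fun a ha b hb => pyKeyLt_digit a b
        (by simpa using (List.mem_filter.1 ha).2) (by simpa using (List.mem_filter.1 hb).2))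
      _ [] (fun a ha => ha) (by simp)).symm
  · rw [PySem.List.sorted_eq_foldl_insertBy]
    exact (foldl_insertBy_congr pyKeyLt (fun a b => decide (a < b))
      (chr_list.filter (fun a => !PySem.Str.strIsdigit a))
      (fun a ha b hb => pyKeyLt_alpha a b
        (by simpa using (List.mem_filter.1 ha).2) (by simpa using (List.mem_filter.1 hb).2))
      _ [] (fun a ha => ha) (by simp)).symm
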